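-- pv_equiv track=rewrite | github.com/Pritz69/GFG_POTD | Medium/Game of XOR/game-of-xor.py | gameOfXor
-- ===== SOURCE A (Python) =====
-- def gameOfXor(N , A):
--     # code here
--     x=0
--     for i in range(N) :
--         v=A[i]
--         c=(i+1)*(N-i)
--         if c%2==1 :
--             x=x^v
--     return x
-- ===== SOURCE B (Python) =====
-- def gameOfXor(N, A):
--     # (i+1)*(N-i) is odd iff i is even and N is odd, so: even N -> 0,
--     # odd N -> XOR of the even-indexed elements only.
--     if N % 2 == 0:
--         return 0
--     x = 0
--     for i in range(0, N, 2):
--         x ^= A[i]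
--     return x
-- ===== Notes on version B (the rewrite author's own statement) =====
-- stated objective: simpler
-- what changed: Uses the closed-form parity rule ((i+1)*(N-i) is odd iff N is odd and i is even): returns 0 immediately for even N and otherwise XORs only the even-indexed elements with a stride-2 range, instead of computing and parity-testing c=(i+1)*(N-i) for every index.
import Mathlib
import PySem

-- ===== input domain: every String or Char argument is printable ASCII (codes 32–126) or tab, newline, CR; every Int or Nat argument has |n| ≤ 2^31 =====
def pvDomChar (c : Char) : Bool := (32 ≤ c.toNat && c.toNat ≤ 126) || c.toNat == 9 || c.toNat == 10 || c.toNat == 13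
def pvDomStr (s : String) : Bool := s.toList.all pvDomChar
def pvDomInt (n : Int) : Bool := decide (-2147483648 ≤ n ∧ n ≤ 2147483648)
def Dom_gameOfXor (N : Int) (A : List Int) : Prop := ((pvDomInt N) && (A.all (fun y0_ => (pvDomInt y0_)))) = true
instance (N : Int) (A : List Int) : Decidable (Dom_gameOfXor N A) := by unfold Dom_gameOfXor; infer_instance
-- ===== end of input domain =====

-- B replaces the per-index parity test c=(i+1)*(N-i) by its closed form: 0 for even N,
-- else the XOR of the even-indexed elements (stride-2 range). Equivalence of return values.

-- ===== PORT A =====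
def gameOfXor (N : Int) (A : List Int) : Int :=
  (PySem.List.pyRange 0 N 1).foldl (fun x i =>
    let v := PySem.List.pyGetD A i 0
    let c := (i + 1) * (N - i)
    if PySem.Int.mod c 2 = 1 then PySem.Int.bxor x v else x) 0

-- ===== PORT B =====
def gameOfXor_alt (N : Int) (A : List Int) : Int :=
  if PySem.Int.mod N 2 = 0 then 0
  else (PySem.List.pyRange 0 N 2).foldl (fun x i => PySem.Int.bxor x (PySem.List.pyGetD A i 0)) 0

-- ===== PRECONDITION & SPEC =====
-- Python A indexes A[i] for every i < N, so it raises IndexError when N > len(A); excluded.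
def Pre_gameOfXor (N : Int) (A : List Int) : Prop := N ≤ (A.length : Int)
instance (N : Int) (A : List Int) : Decidable (Pre_gameOfXor N A) := by unfold Pre_gameOfXor; infer_instance
def pvWitness_gameOfXor : Int × List Int := (3, [5, 7, 9])

def Spec_gameOfXor (N : Int) (A : List Int) (out : Int) : Prop := out = gameOfXor_alt N A
instance (N : Int) (A : List Int) (out : Int) : Decidable (Spec_gameOfXor N A out) := by unfold Spec_gameOfXor; infer_instance

-- ===== CLAIM (what is proved, stated in full; the proofs are below) =====
def Claim_equal_gameOfXor : Prop := ∀ (N : Int) (A : List Int), Dom_gameOfXor N A → Pre_gameOfXor N A → Spec_gameOfXor N A (gameOfXor N A)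

-- ===== LEMMAS AND PROOFS =====

-- The parity of c = (i+1)*(N-i):  c % 2 = 1  ↔  N odd and i even.
theorem pv_cond_iff (N i : Int) :
    (PySem.Int.mod ((i + 1) * (N - i)) 2 = 1) ↔ (N % 2 = 1 ∧ i % 2 = 0) := by
  rw [PySem.Int.mod_eq_emod_of_pos (by omega)]
  rw [Int.mul_emod]
  rcases Int.emod_two_eq_zero_or_one i with hi | hi <;>
    rcases Int.emod_two_eq_zero_or_one N with hN | hN <;>
    (have h1 : (i + 1) % 2 = (i % 2 + 1) % 2 := by omega) <;>
    (have h2 : (N - i) % 2 = ((N % 2) - (i % 2) + 2) % 2 := by omega) <;>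
    rw [h1, h2, hi, hN] <;> decide

-- When N is even the guarded fold never fires.
theorem pv_even_fold (N : Int) (A : List Int) (hN : N % 2 = 0) (l : List Int) (x : Int) :
    l.foldl (fun x i =>
      let v := PySem.List.pyGetD A i 0
      let c := (i + 1) * (N - i)
      if PySem.Int.mod c 2 = 1 then PySem.Int.bxor x v else x) x = x := by
  induction l generalizing x with
  | nil => rfl
  | cons a l ih =>
      simp only [List.foldl_cons]
      rw [if_neg (by rw [pv_cond_iff]; omega)]
      exact ih x

-- Core induction for odd N: the guarded fold over indices 0..2m equals the plain xor-fold over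
-- the even indices 0,2,…,2m.
theorem pv_odd_fold (A : List Int) (m : Nat) (x : Int) :
    List.foldl
      (fun (x : Int) (k : Nat) => if (k : Int) % 2 = 0 then PySem.Int.bxor x (PySem.List.pyGetD A (k : Int) 0) else x)
      x (List.range (2 * m + 1))
    = List.foldl
      (fun (x : Int) (k : Nat) => PySem.Int.bxor x (PySem.List.pyGetD A ((2 * k : Nat) : Int) 0))
      x (List.range (m + 1)) := by
  induction m generalizing x with
  | zero => simp [PySem.List.pyGetD, PySem.List.pyGet?, PySem.List.pyIdx?]
  | succ m ih =>
      have h1 : 2 * (m + 1) + 1 = (2 * m + 1) + 1 + 1 := by omega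
      rw [h1, List.range_succ, List.range_succ, List.range_succ (n := m + 1)]
      rw [List.foldl_append, List.foldl_append, List.foldl_append]
      simp only [List.foldl_cons, List.foldl_nil]
      rw [ih]
      rw [if_pos (by omega), if_neg (by omega)]
      have h2 : 2 * (m + 1) = 2 * m + 2 := by omega
      rw [h2]

theorem pv_main (N : Int) (A : List Int) : gameOfXor N A = gameOfXor_alt N A := by
  unfold gameOfXor gameOfXor_alt
  by_cases hN : PySem.Int.mod N 2 = 0
  · rw [if_pos hN]
    exact pv_even_fold N A (by rw [PySem.Int.mod_eq_emod_of_pos (by omega)] at hN; omega) _ 0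
  · rw [if_neg hN]
    have hodd : N % 2 = 1 := by
      rw [PySem.Int.mod_eq_emod_of_pos (by omega)] at hN; omega
    by_cases hpos : 0 < N
    · -- rewrite A's guarded fold to the even-index test
      rw [PySem.List.foldl_congr_mem _ _
          (fun x i => if i % 2 = 0 then PySem.Int.bxor x (PySem.List.pyGetD A i 0) else x) 0
          (by
            intro acc i _
            simp only []
            by_cases h : i % 2 = 0
            · rw [if_pos (by rw [pv_cond_iff]; exact ⟨hodd, h⟩), if_pos h]
            · rw [if_neg (by rw [pv_cond_iff]; omega), if_neg h])]
      -- normalise both ranges to List.range maps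
      obtain ⟨m, hm⟩ : ∃ m : Nat, N = ((2 * m + 1 : Nat) : Int) := by
        refine ⟨(N.toNat - 1) / 2, ?_⟩; push_cast; omega
      push_cast at hm
      have hr1 : PySem.List.pyRange 0 N 1 = (List.range (2 * m + 1)).map (fun (k : Nat) => (k : Int)) := by
        rw [PySem.List.pyRange_one]
        have h : (N - 0).toNat = 2 * m + 1 := by omega
        rw [h]
        exact List.map_congr_left (fun k _ => by simp)
      have hr2 : PySem.List.pyRange 0 N 2
          = (List.range (m + 1)).map (fun k => ((2 * k : Nat) : Int)) := by
        rw [PySem.List.pyRange_of_pos 0 N (by omega), if_pos (by omega)]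
        have h : ((N - 0 + 2 - 1) / 2).toNat = m + 1 := by omega
        rw [h]
        exact List.map_congr_left (fun k _ => by push_cast; ring)
      rw [hr1, hr2, List.foldl_map, List.foldl_map]
      exact pv_odd_fold A m 0
    · -- N negative (and odd): both ranges are empty
      rw [PySem.List.pyRange_one_eq_nil (by omega)]
      rw [PySem.List.pyRange_of_pos 0 N (by norm_num), if_neg hpos]
      simp

-- ===== VERDICT (by name: the statement is the Claim_ definition above) =====
theorem gameOfXor_spec : Claim_equal_gameOfXor := by
  intro N A _ _
  exact pv_main N A
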